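-- pv_equiv track=rewrite | github.com/phuwit/KMITL-ObjectOrientedDataStructure | chapter1/4_draw_a_heart.notypes.py | create_double_spikes
-- ===== SOURCE A (Python) =====
-- def create_layer(meat_width):
--     layer = ''
--     layer += CHAR_BORDER
--     meat_width -= 2
--     if meat_width <= 0:
--         return layer
--     layer += (meat_width * CHAR_INSIDES)
--     layer += CHAR_BORDER
--     return layer
--
-- def create_double_spikes(height):
--     layers = []
--     for empty_side_width in range(height - 1, -1, -1):
--         meat_width = ((height - empty_side_width) * 2) - 1
--         empty_middle_width = (empty_side_width * 2) - 1
--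
--         layer = ''
--
--         layer += CHAR_EMPTY * empty_side_width
--         layer += create_layer(meat_width)
--         layer += CHAR_EMPTY * empty_middle_width
--         if empty_side_width == 0:
--             layer += create_layer(meat_width)[1::]
--         else:
--             layer += create_layer(meat_width)
--         layer += CHAR_EMPTY * empty_side_width
--
--         layers.append(layer)
--     return layers
--
-- CHAR_EMPTY = '.'
--
-- CHAR_BORDER = '*'
--
-- CHAR_INSIDES = '+'
-- ===== SOURCE B (Python) =====
-- def create_double_spikes(height):
--     rows = []
--     for e in range(height - 1, -1, -1):
--         m = (height - e) * 2 - 1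
--         core = '*' if m == 1 else '*' + '+' * (m - 2) + '*'
--         half = '.' * e + core + '.' * e
--         rows.append(half + half[:-1][::-1])
--     return rows
-- ===== Notes on version B (the rewrite author's own statement) =====
-- stated objective: alternative
-- what changed: B exploits that every row is a palindrome: it builds only the left half ('.'*e + core + '.'*e) and appends its reflection half[:-1][::-1], eliminating A's separate middle-gap computation, second create_layer call and the special bottom-row [1:] slice.
import Mathlib
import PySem

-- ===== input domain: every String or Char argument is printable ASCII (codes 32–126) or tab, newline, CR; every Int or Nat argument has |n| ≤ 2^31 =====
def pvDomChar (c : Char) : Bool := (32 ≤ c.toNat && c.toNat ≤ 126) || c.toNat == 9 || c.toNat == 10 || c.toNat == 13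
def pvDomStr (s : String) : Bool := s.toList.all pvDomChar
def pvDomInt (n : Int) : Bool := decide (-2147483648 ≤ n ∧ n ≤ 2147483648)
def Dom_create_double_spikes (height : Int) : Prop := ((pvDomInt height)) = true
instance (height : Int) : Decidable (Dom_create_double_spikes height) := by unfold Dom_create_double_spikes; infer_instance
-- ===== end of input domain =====

-- B builds only the left half of each (palindromic) row and mirrors it, replacing A's
-- middle-gap arithmetic and special bottom-row slice; objective: alternative decomposition.

-- ===== PORT A =====
def CHAR_EMPTY : String := "."
def CHAR_BORDER : String := "*"
def CHAR_INSIDES : String := "+"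

-- 'n * str' is ported as String.ofList (PySem.List.pyRepeat str.toList n) (exact: repetition of code points)
def create_layer (meat_width : Int) : String :=
  let layer : String := ""
  let layer := layer ++ CHAR_BORDER
  let meat_width := meat_width - 2
  if meat_width ≤ 0 then layer
  else
    let layer := layer ++ String.ofList (PySem.List.pyRepeat CHAR_INSIDES.toList meat_width)
    let layer := layer ++ CHAR_BORDER
    layer

def create_double_spikes (height : Int) : List String :=
  (PySem.List.pyRange (height - 1) (-1) (-1)).foldl (fun layers empty_side_width =>
    let meat_width := ((height - empty_side_width) * 2) - 1
    let empty_middle_width := (empty_side_width * 2) - 1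
    let layer : String := ""
    let layer := layer ++ String.ofList (PySem.List.pyRepeat CHAR_EMPTY.toList empty_side_width)
    let layer := layer ++ create_layer meat_width
    let layer := layer ++ String.ofList (PySem.List.pyRepeat CHAR_EMPTY.toList empty_middle_width)
    let layer := if empty_side_width == 0
      then layer ++ PySem.Str.slice (create_layer meat_width) (some 1) none
      else layer ++ create_layer meat_width
    let layer := layer ++ String.ofList (PySem.List.pyRepeat CHAR_EMPTY.toList empty_side_width)
    layers ++ [layer]) []

-- ===== PORT B =====
def create_double_spikes_alt (height : Int) : List String :=
  (PySem.List.pyRange (height - 1) (-1) (-1)).foldl (fun rows e =>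
    let m := (height - e) * 2 - 1
    let core : String :=
      if m == 1 then "*"
      else "*" ++ String.ofList (PySem.List.pyRepeat "+".toList (m - 2)) ++ "*"
    let half := String.ofList (PySem.List.pyRepeat ".".toList e) ++ core
                  ++ String.ofList (PySem.List.pyRepeat ".".toList e)
    -- half[:-1][::-1]; Str.slice? is none only for step 0, here the step is -1
    let mirror := match PySem.Str.slice? (PySem.Str.slice half none (some (-1))) none none (-1) with
      | some r => r
      | none => ""
    rows ++ [half ++ mirror]) []

-- ===== PRECONDITION & SPEC =====
def Spec_create_double_spikes (height : Int) (out : List String) : Prop := out = create_double_spikes_alt height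
instance (height : Int) (out : List String) : Decidable (Spec_create_double_spikes height out) := by unfold Spec_create_double_spikes; infer_instance

-- ===== CLAIM (what is proved, stated in full; the proofs are below) =====
def Claim_equal_create_double_spikes : Prop := ∀ (height : Int), Dom_create_double_spikes height → Spec_create_double_spikes height (create_double_spikes height)

-- ===== LEMMAS AND PROOFS =====

-- dropLast-then-reverse is reverse-then-tail
theorem pv_reverse_dropLast {α : Type} (l : List α) : l.dropLast.reverse = l.reverse.tail := by
  induction l using List.reverseRecOn with
  | nil => simp
  | append_singleton xs x _ => simp

-- the generic mirror identity over char lists: for a palindromic nonempty core L,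
-- half ++ reverse (dropLast half) equals A's row shape
theorem pv_mirror_row (e : Nat) (L : List Char) (hL : L.reverse = L) :
    (List.replicate e '.' ++ L ++ List.replicate e '.')
      ++ ((List.replicate e '.' ++ L ++ List.replicate e '.').dropLast).reverse
    = List.replicate e '.' ++ L ++ List.replicate (2 * e - 1) '.'
      ++ (if e = 0 then L.tail else L) ++ List.replicate e '.' := by
  cases e with
  | zero =>
      simp only [List.replicate, List.nil_append, List.append_nil, if_true]
      rw [pv_reverse_dropLast, hL]
  | succ s =>
      have h1 : (List.replicate (s+1) '.' ++ L ++ List.replicate (s+1) '.').dropLast.reverse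
          = List.replicate s '.' ++ L ++ List.replicate (s+1) '.' := by
        rw [List.append_assoc, List.dropLast_append_of_ne_nil (by simp),
          List.dropLast_append_of_ne_nil (by simp)]
        simp [List.dropLast_replicate, hL, List.append_assoc]
      rw [h1]
      have h2 : List.replicate (2 * (s + 1) - 1) '.' = List.replicate s '.' ++ '.' :: List.replicate s '.' := by
        rw [show 2 * (s + 1) - 1 = s + (s + 1) from by omega, List.replicate_add,
          List.replicate_succ]
      rw [h2, List.replicate_succ']
      simp [List.append_assoc]

theorem pv_layer_toList (m : Int) (hm : 1 ≤ m) (hne2 : m ≠ 2) :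
    (create_layer m).toList
      = if m = 1 then ['*'] else '*' :: (List.replicate (m - 2).toNat '+' ++ ['*']) := by
  by_cases h : m - 2 ≤ 0
  · have h1 : m = 1 := by omega
    subst h1
    simp [create_layer, CHAR_BORDER]
  · have h1 : ¬ m = 1 := by omega
    simp [create_layer, h, h1, CHAR_BORDER, CHAR_INSIDES, PySem.List.pyRepeat_singleton]

-- per-iteration row equality for in-range e
theorem pv_row_eq (height e : Int) (h0 : 0 ≤ e) (h1 : e < height) (acc : List String) :
    (fun layers empty_side_width =>
    let meat_width := ((height - empty_side_width) * 2) - 1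
    let empty_middle_width := (empty_side_width * 2) - 1
    let layer : String := ""
    let layer := layer ++ String.ofList (PySem.List.pyRepeat CHAR_EMPTY.toList empty_side_width)
    let layer := layer ++ create_layer meat_width
    let layer := layer ++ String.ofList (PySem.List.pyRepeat CHAR_EMPTY.toList empty_middle_width)
    let layer := if empty_side_width == 0
      then layer ++ PySem.Str.slice (create_layer meat_width) (some 1) none
      else layer ++ create_layer meat_width
    let layer := layer ++ String.ofList (PySem.List.pyRepeat CHAR_EMPTY.toList empty_side_width)
    layers ++ [layer]) acc e
    = (fun rows e =>
    let m := (height - e) * 2 - 1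
    let core : String :=
      if m == 1 then "*"
      else "*" ++ String.ofList (PySem.List.pyRepeat "+".toList (m - 2)) ++ "*"
    let half := String.ofList (PySem.List.pyRepeat ".".toList e) ++ core
                  ++ String.ofList (PySem.List.pyRepeat ".".toList e)
    let mirror := match PySem.Str.slice? (PySem.Str.slice half none (some (-1))) none none (-1) with
      | some r => r
      | none => ""
    rows ++ [half ++ mirror]) acc e := by
  obtain ⟨E, rfl⟩ := Int.eq_ofNat_of_zero_le h0
  have hm0 : (1:Int) ≤ (height - E) * 2 - 1 := by omega
  have hne2 : ((height - E) * 2 - 1 : Int) ≠ 2 := by omega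
  dsimp only
  refine congrArg (fun s => acc ++ [s]) ?_
  apply String.toList_inj.mp
  rw [PySem.Str.slice?_none_none_neg_one]
  dsimp only
  have hdot : (".": String).toList = ['.'] := by simp
  have hstar : ("*": String).toList = ['*'] := by simp
  have hplus : ("+": String).toList = ['+'] := by simp
  have hemp : ("": String).toList = [] := by simp
  have hmid : (((E:Int) * 2 - 1).toNat) = 2 * E - 1 := by omega
  simp only [String.toList_append, String.toList_ofList, PySem.Str.toList_slice,
    PySem.Chars.slice_eq_listSlice, PySem.List.slice_from_one, PySem.List.slice_to_neg_one,
    CHAR_EMPTY, hdot, hstar, hplus, hemp, apply_ite String.toList,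
    PySem.List.pyRepeat_singleton, Int.toNat_natCast, hmid, beq_iff_eq, Int.natCast_eq_zero,
    List.cons_append, List.nil_append, pv_layer_toList _ hm0 hne2]
  have hpal : (if ((height:Int) - E) * 2 - 1 = 1 then ['*']
      else '*' :: (List.replicate ((((height:Int) - E) * 2 - 1) - 2).toNat '+' ++ ['*'])).reverse
      = (if ((height:Int) - E) * 2 - 1 = 1 then ['*']
      else '*' :: (List.replicate ((((height:Int) - E) * 2 - 1) - 2).toNat '+' ++ ['*'])) := by
    split_ifs <;> simp [List.reverse_replicate]
  have key := pv_mirror_row E (if ((height:Int) - E) * 2 - 1 = 1 then ['*']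
      else '*' :: (List.replicate ((((height:Int) - E) * 2 - 1) - 2).toNat '+' ++ ['*'])) hpal
  conv_rhs => rw [key]
  split_ifs <;> simp [List.append_assoc]
-- ===== VERDICT (by name: the statement is the Claim_ definition above) =====
theorem create_double_spikes_spec : Claim_equal_create_double_spikes := by
  intro height _
  unfold Spec_create_double_spikes create_double_spikes create_double_spikes_alt
  apply PySem.List.foldl_congr_mem
  intro acc e he
  have := PySem.List.mem_pyRange_neg_one.mp he
  exact pv_row_eq height e (by omega) (by omega) acc
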